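-- pv_equiv track=rewrite | github.com/Klaudia1303/student_code_analysis | Progetto-tirocinio2024/data/student_data/2065747_Perillo/LabPython07/A_Ex2.py | A_Ex2
-- ===== SOURCE A (Python) =====
-- def A_Ex2(start,n):
--     risultato=[]
--     i=0
--     k=0
--     while i<n:
--         k+=1
--         if k>=start and k%2!=0:
--             i+=1
--             risultato.append(k)
--     return(risultato)
-- ===== SOURCE B (Python) =====
-- def A_Ex2(start, n):
--     if n <= 0:
--         return []
--     first = max(start, 1)
--     if first % 2 == 0:
--         first += 1
--     return [first + 2*i for i in range(n)]
-- ===== Notes on version B (the rewrite author's own statement) =====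
-- stated objective: faster
-- what changed: Replaces the counting while-loop that scans every integer from 1 upward with a closed form: compute the smallest odd number >= max(start,1) and emit the arithmetic sequence with step 2.
import Mathlib
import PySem

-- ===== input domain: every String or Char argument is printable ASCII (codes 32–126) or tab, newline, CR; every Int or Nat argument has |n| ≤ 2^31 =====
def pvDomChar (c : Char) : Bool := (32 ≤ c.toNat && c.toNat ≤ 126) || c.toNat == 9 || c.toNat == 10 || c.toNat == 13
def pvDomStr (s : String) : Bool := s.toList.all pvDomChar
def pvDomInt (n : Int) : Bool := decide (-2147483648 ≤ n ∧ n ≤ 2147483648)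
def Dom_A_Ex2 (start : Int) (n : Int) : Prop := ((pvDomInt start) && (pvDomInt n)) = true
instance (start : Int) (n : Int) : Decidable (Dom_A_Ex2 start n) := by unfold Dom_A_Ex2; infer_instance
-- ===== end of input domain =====

-- B replaces A's counting while-loop over all integers from 1 with a closed form:
-- smallest odd >= max(start,1), then the arithmetic sequence with step 2 (objective: faster, O(n) vs O(start+n)).


-- ===== PORT A =====
-- A's while-loop, transcribed with a fuel bound large enough for every input
-- (fuel is only a totality guard: the loop exits by itself when i reaches n).
def A_Ex2_loop (fuel : Nat) (start n : Int) (i k : Int) (acc : List Int) : List Int :=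
  match fuel with
  | 0 => acc
  | fuel + 1 =>
    if i < n then
      let k' := k + 1
      if k' ≥ start ∧ PySem.Int.mod k' 2 ≠ 0 then
        A_Ex2_loop fuel start n (i + 1) k' (acc ++ [k'])
      else
        A_Ex2_loop fuel start n i k' acc
    else acc

def A_Ex2 (start : Int) (n : Int) : List Int :=
  A_Ex2_loop (max start 1 + 1 + 2 * n).toNat start n 0 0 []

-- ===== PORT B =====
def A_Ex2_alt (start : Int) (n : Int) : List Int :=
  if n ≤ 0 then []
  else
    let first := max start 1
    let first := if PySem.Int.mod first 2 = 0 then first + 1 else first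
    (List.range n.toNat).map (fun i : Nat => first + 2 * (i : Int))

-- ===== PRECONDITION & SPEC =====
def Spec_A_Ex2 (start : Int) (n : Int) (out : List Int) : Prop := out = A_Ex2_alt start n
instance (start : Int) (n : Int) (out : List Int) : Decidable (Spec_A_Ex2 start n out) := by unfold Spec_A_Ex2; infer_instance

-- ===== CLAIM (what is proved, stated in full; the proofs are below) =====
def Claim_equal_A_Ex2 : Prop := ∀ (start : Int) (n : Int), Dom_A_Ex2 start n → Spec_A_Ex2 start n (A_Ex2 start n)

-- ===== LEMMAS AND PROOFS =====

-- smallest odd integer ≥ max start (k+1): the next value the loop will append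
def nOdd (start k : Int) : Int :=
  let b := max start (k + 1)
  if b % 2 = 0 then b + 1 else b

lemma nOdd_gt (start k : Int) : k < nOdd start k := by
  unfold nOdd; dsimp only; split_ifs <;> omega

lemma nOdd_ge_start (start k : Int) : start ≤ nOdd start k := by
  unfold nOdd; dsimp only; split_ifs with h
  · omega
  · omega

lemma nOdd_odd (start k : Int) : nOdd start k % 2 = 1 := by
  unfold nOdd; dsimp only; split_ifs with h
  · omega
  · omega

lemma nOdd_hit (start k : Int) (h1 : k + 1 ≥ start) (h2 : (k + 1) % 2 = 1) :
    nOdd start k = k + 1 := by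
  unfold nOdd; dsimp only
  have : max start (k + 1) = k + 1 := by omega
  rw [this]
  split_ifs with h
  · omega
  · rfl

lemma nOdd_skip (start k : Int) (h : ¬ (k + 1 ≥ start ∧ (k + 1) % 2 = 1)) :
    nOdd start (k + 1) = nOdd start k := by
  unfold nOdd; dsimp only
  rcases (not_and_or.mp h) with h1 | h2
  · -- k+1 < start, so max start (k+2) = max start (k+1) = start
    have hs : k + 1 < start := by omega
    have e1 : max start (k + 1 + 1) = start := by omega
    have e2 : max start (k + 1) = start := by omega
    rw [e1, e2]
  · -- k+1 even
    have he : (k + 1) % 2 = 0 := by omega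
    by_cases hc : k + 1 ≥ start
    · have e1 : max start (k + 1 + 1) = k + 2 := by omega
      have e2 : max start (k + 1) = k + 1 := by omega
      rw [e1, e2]
      have h2 : (k + 2) % 2 = 1 := by omega
      split_ifs <;> omega
    · have e1 : max start (k + 1 + 1) = max start (k + 1) := by omega
      rw [e1]

lemma nOdd_next (start k : Int) (h : nOdd start k = k + 1) :
    nOdd start (k + 1) = k + 3 := by
  have hge := nOdd_ge_start start k
  have hodd := nOdd_odd start k
  unfold nOdd; dsimp only
  have e1 : max start (k + 1 + 1) = k + 2 := by omega
  rw [e1]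
  split_ifs with a <;> omega

-- positive k: PySem.Int.mod agrees with % 2 ≠ 0 ↔ % 2 = 1
lemma pymod_two (k : Int) : PySem.Int.mod k 2 = k % 2 :=
  PySem.Int.mod_eq_emod_of_pos (by norm_num)

-- the loop returns its accumulator once i has reached n
lemma loop_done (start n i k : Int) (acc : List Int) (h : ¬ i < n) :
    ∀ f, A_Ex2_loop f start n i k acc = acc := by
  intro f; cases f with
  | zero => rfl
  | succ f => unfold A_Ex2_loop; rw [if_neg h]

-- the loop invariant: from state (i, k) with i < n, enough fuel, the loop appends
-- the arithmetic sequence starting at nOdd start k of length (n - i).toNat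
lemma loop_spec (start n : Int) : ∀ (fuel : Nat) (i k : Int) (acc : List Int),
    0 ≤ k → i < n → (fuel : Int) ≥ (nOdd start k - k) + 2 * (n - i - 1) →
    A_Ex2_loop fuel start n i k acc =
      acc ++ (List.range (n - i).toNat).map (fun j : Nat => nOdd start k + 2 * (j : Int)) := by
  intro fuel
  induction fuel with
  | zero =>
    intro i k acc hk hi hf
    have := nOdd_gt start k
    exfalso; simp at hf; omega
  | succ fuel ih =>
    intro i k acc hk hi hf
    unfold A_Ex2_loop
    rw [if_pos hi]
    have hmod : PySem.Int.mod (k + 1) 2 = (k + 1) % 2 := pymod_two _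
    by_cases hc : k + 1 ≥ start ∧ (k + 1) % 2 = 1
    · have hcond : k + 1 ≥ start ∧ PySem.Int.mod (k + 1) 2 ≠ 0 := by
        refine ⟨hc.1, ?_⟩; rw [hmod]; omega
      rw [if_pos hcond]
      have hhit : nOdd start k = k + 1 := nOdd_hit start k hc.1 hc.2
      by_cases hin : i + 1 < n
      · have hnext : nOdd start (k + 1) = k + 3 := nOdd_next start k hhit
        rw [ih (i + 1) (k + 1) (acc ++ [k + 1]) (by omega) hin (by rw [hnext]; push_cast at hf ⊢; omega)]
        rw [hnext, hhit]
        have hlen : (n - i).toNat = (n - (i + 1)).toNat + 1 := by omega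
        rw [hlen, List.range_succ_eq_map, List.map_cons, List.map_map,
            List.append_assoc, List.singleton_append]
        congr 1
        congr 1
        · push_cast; ring
        · apply List.map_congr_left; intro j _; simp only [Function.comp]; push_cast; ring
      · -- last iteration: i + 1 = n
        have hn : n - i = 1 := by omega
        rw [loop_done start n (i + 1) (k + 1) (acc ++ [k + 1]) (by omega) fuel]
        rw [hn, hhit]
        norm_num
    · have hcond : ¬ (k + 1 ≥ start ∧ PySem.Int.mod (k + 1) 2 ≠ 0) := by
        rw [hmod]; intro ⟨a, b⟩; exact hc ⟨a, by omega⟩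
      rw [if_neg hcond]
      have hskip : nOdd start (k + 1) = nOdd start k := nOdd_skip start k hc
      rw [ih i (k + 1) acc (by omega) hi (by rw [hskip]; push_cast at hf ⊢; omega)]
      rw [hskip]

-- ===== VERDICT (by name: the statement is the Claim_ definition above) =====
theorem A_Ex2_spec : Claim_equal_A_Ex2 := by
  intro start n _
  unfold Spec_A_Ex2 A_Ex2 A_Ex2_alt
  by_cases hn : n ≤ 0
  · rw [if_pos hn]
    exact loop_done start n 0 0 [] (by omega) _
  · rw [if_neg hn]
    have hbound : ((max start 1 + 1 + 2 * n).toNat : Int) ≥ (nOdd start 0 - 0) + 2 * (n - 0 - 1) := by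
      have h1 := nOdd_ge_start start 0
      have h2 := nOdd_gt start 0
      have h3 : nOdd start 0 ≤ max start 1 + 1 := by
        unfold nOdd; dsimp only; split_ifs <;> omega
      omega
    rw [loop_spec start n _ 0 0 [] le_rfl (by omega) hbound]
    have hm : PySem.Int.mod (max start 1) 2 = (max start 1) % 2 := pymod_two _
    have hiff : (if PySem.Int.mod (max start 1) 2 = 0 then max start 1 + 1 else max start 1) = nOdd start 0 := by
      rw [hm]; unfold nOdd; dsimp only
      have e : max start (0 + 1) = max start 1 := by norm_num
      rw [e]
    dsimp only
    rw [hiff]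
    norm_num
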